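-- pv_equiv track=rewrite | github.com/pypi-data/pypi-mirror-283 | packages/mcising/mcising-0.12.tar.gz/mcising-0.12/mcising/montecarlo.py | calculate_corr_size
-- ===== SOURCE A (Python) =====
-- def calculate_corr_size(lattice_size):
--     """
--     Calculate CORR_SIZE dynamically based on lattice size.
--
--     Parameters
--     ----------
--     lattice_size : int
--         The size of the lattice.
--
--     Returns
--     -------
--     int
--         The calculated CORR_SIZE.
--     """
--     unique_distances = set()
--
--     for i in range(lattice_size):
--         for j in range(lattice_size):
--             for k in range(lattice_size):
--                 for l in range(lattice_size):
--                     x_distance = min(abs(i - k), lattice_size - abs(i - k))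
--                     y_distance = min(abs(j - l), lattice_size - abs(j - l))
--                     distance_squared = x_distance**2 + y_distance**2
--                     unique_distances.add(distance_squared)
--
--     return len(unique_distances)
-- ===== SOURCE B (Python) =====
-- def calculate_corr_size(lattice_size):
--     """
--     Calculate CORR_SIZE dynamically based on lattice size.
--
--     On an n x n torus the per-axis toroidal distance min(|i-k|, n-|i-k|)
--     takes exactly the values 0..n//2, so the distinct squared distances
--     are exactly {a*a + b*b : 0 <= a, b <= n//2}.
--     """
--     if lattice_size <= 0:
--         return 0
--     half = lattice_size // 2
--     return len({a * a + b * b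
--                 for a in range(half + 1)
--                 for b in range(half + 1)})
-- ===== Notes on version B (the rewrite author's own statement) =====
-- stated objective: faster
-- what changed: Replaces the quadruple loop over all site pairs by a double loop over the achievable per-axis toroidal distances 0..n//2, collecting a*a+b*b into a set.
import Mathlib
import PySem

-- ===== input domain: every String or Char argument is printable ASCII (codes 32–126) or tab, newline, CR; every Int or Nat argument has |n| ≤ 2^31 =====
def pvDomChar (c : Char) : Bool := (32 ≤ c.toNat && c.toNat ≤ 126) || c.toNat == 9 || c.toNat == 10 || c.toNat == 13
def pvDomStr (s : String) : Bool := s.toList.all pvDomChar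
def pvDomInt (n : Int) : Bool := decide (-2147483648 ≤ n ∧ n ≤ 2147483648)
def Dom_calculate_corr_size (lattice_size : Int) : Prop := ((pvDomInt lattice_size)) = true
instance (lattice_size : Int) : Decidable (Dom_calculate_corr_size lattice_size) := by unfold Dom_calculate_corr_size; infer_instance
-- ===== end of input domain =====

-- B replaces A's O(n^4) loop over all site pairs by a direct O(n^2) enumeration of the per-axis toroidal distances 0..n//2 (objective: faster).


-- ===== PORT A =====
-- A: quadruple loop over all site pairs, collecting squared toroidal distances.
def calculate_corr_size (lattice_size : Int) : Int :=
  let r := PySem.List.pyRange 0 lattice_size 1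
  let s : PySem.Set Int :=
    r.foldl (fun s i =>
      r.foldl (fun s j =>
        r.foldl (fun s k =>
          r.foldl (fun s l =>
            PySem.Set.add s
              ((min (i - k).natAbs (lattice_size - (i - k).natAbs) : Int) ^ 2 +
               (min (j - l).natAbs (lattice_size - (j - l).natAbs) : Int) ^ 2)) s) s) s)
      PySem.Set.empty
  (PySem.Set.len s : Int)

-- ===== PORT B =====
-- B: double loop over the achievable per-axis distances 0..n//2.
def calculate_corr_size_alt (lattice_size : Int) : Int :=
  if lattice_size ≤ 0 then 0
  else
    let half := PySem.Int.floordiv lattice_size 2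
    let r := PySem.List.pyRange 0 (half + 1) 1
    let s : PySem.Set Int :=
      r.foldl (fun s a => r.foldl (fun s b => PySem.Set.add s (a * a + b * b)) s)
        PySem.Set.empty
    (PySem.Set.len s : Int)

-- ===== PRECONDITION & SPEC =====
def Spec_calculate_corr_size (lattice_size : Int) (out : Int) : Prop := out = calculate_corr_size_alt lattice_size
instance (lattice_size : Int) (out : Int) : Decidable (Spec_calculate_corr_size lattice_size out) := by unfold Spec_calculate_corr_size; infer_instance

-- ===== CLAIM (what is proved, stated in full; the proofs are below) =====
def Claim_equal_calculate_corr_size : Prop := ∀ (lattice_size : Int), Dom_calculate_corr_size lattice_size → Spec_calculate_corr_size lattice_size (calculate_corr_size lattice_size)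

-- ===== LEMMAS AND PROOFS =====

-- membership in a foldl whose step extends membership by a predicate
theorem pv_mem_foldl {β : Type} (g : PySem.Set Int → β → PySem.Set Int)
    (P : β → Int → Prop)
    (hg : ∀ s b y, y ∈ g s b ↔ y ∈ s ∨ P b y) :
    ∀ (l : List β) (s : PySem.Set Int) (y : Int),
      y ∈ l.foldl g s ↔ y ∈ s ∨ ∃ b ∈ l, P b y := by
  intro l
  induction l with
  | nil => simp
  | cons x xs ih =>
    intro s y
    simp only [List.foldl_cons, ih, hg, List.mem_cons]
    constructor
    · rintro ((h | h) | ⟨b, hb, h⟩)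
      · exact Or.inl h
      · exact Or.inr ⟨x, Or.inl rfl, h⟩
      · exact Or.inr ⟨b, Or.inr hb, h⟩
    · rintro (h | ⟨b, (rfl | hb), h⟩)
      · exact Or.inl (Or.inl h)
      · exact Or.inl (Or.inr h)
      · exact Or.inr ⟨b, hb, h⟩

-- a foldl whose step preserves Nodup preserves Nodup
theorem pv_nodup_foldl {β : Type} (g : PySem.Set Int → β → PySem.Set Int)
    (hg : ∀ s b, s.Nodup → (g s b).Nodup) :
    ∀ (l : List β) (s : PySem.Set Int), s.Nodup → (l.foldl g s).Nodup := by
  intro l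
  induction l with
  | nil => intro s h; exact h
  | cons x xs ih => intro s h; exact ih _ (hg s x h)

-- per-axis toroidal distances over a full period are exactly 0..n//2
theorem pv_axis_range (n : Int) (hn : 0 < n) (a : Int) :
    (∃ i, (0 ≤ i ∧ i < n) ∧ ∃ k, (0 ≤ k ∧ k < n) ∧
        a = (min (i - k).natAbs (n - (i - k).natAbs) : Int)) ↔
    0 ≤ a ∧ a ≤ PySem.Int.floordiv n 2 := by
  rw [PySem.Int.floordiv_eq_ediv_of_pos (by omega)]
  constructor
  · rintro ⟨i, ⟨hi0, hin⟩, k, ⟨hk0, hkn⟩, rfl⟩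
    have h1 : ((i - k).natAbs : Int) < n := by omega
    have h2 : (0 : Int) ≤ ((i - k).natAbs : Int) := by positivity
    rcases le_total ((i - k).natAbs : Int) (n - ((i - k).natAbs : Int)) with h | h
    · rw [min_eq_left h]; omega
    · rw [min_eq_right h]; omega
  · rintro ⟨ha0, han⟩
    refine ⟨a, ⟨ha0, by omega⟩, 0, ⟨le_refl 0, hn⟩, ?_⟩
    have : ((a - 0).natAbs : Int) = a := by omega
    rw [this, min_eq_left (by omega)]

theorem calculate_corr_size_spec : Claim_equal_calculate_corr_size := by
  intro n _
  unfold Spec_calculate_corr_size calculate_corr_size calculate_corr_size_alt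
  by_cases hn : n ≤ 0
  · have hr : PySem.List.pyRange 0 n 1 = [] := by
      rw [PySem.List.pyRange_one]
      simp
      omega
    simp only [hr, List.foldl_nil, if_pos hn]
    simp [PySem.Set.len, PySem.Set.empty]
  · push Not at hn
    simp only [if_neg (by omega : ¬ n ≤ 0)]
    set r := PySem.List.pyRange 0 n 1 with hrdef
    set half := PySem.Int.floordiv n 2 with hhalf
    set r2 := PySem.List.pyRange 0 (half + 1) 1 with hr2def
    set f : Int → Int → Int :=
      fun i k => (min (i - k).natAbs (n - (i - k).natAbs) : Int) with hf
    -- membership in A's set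
    have h1 : ∀ (i j k : Int) (s : PySem.Set Int) (y : Int),
        y ∈ r.foldl (fun s l => PySem.Set.add s (f i k ^ 2 + f j l ^ 2)) s ↔
        y ∈ s ∨ ∃ l ∈ r, y = f i k ^ 2 + f j l ^ 2 := fun i j k =>
      pv_mem_foldl (fun s l => PySem.Set.add s (f i k ^ 2 + f j l ^ 2))
        (fun l y => y = f i k ^ 2 + f j l ^ 2)
        (fun s b y => PySem.Set.mem_add s _ y) r
    have h2 : ∀ (i j : Int) (s : PySem.Set Int) (y : Int),
        y ∈ r.foldl (fun s k =>
            r.foldl (fun s l => PySem.Set.add s (f i k ^ 2 + f j l ^ 2)) s) s ↔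
        y ∈ s ∨ ∃ k ∈ r, ∃ l ∈ r, y = f i k ^ 2 + f j l ^ 2 := fun i j =>
      pv_mem_foldl _ _ (fun s b y => h1 i j b s y) r
    have h3 : ∀ (i : Int) (s : PySem.Set Int) (y : Int),
        y ∈ r.foldl (fun s j => r.foldl (fun s k =>
            r.foldl (fun s l => PySem.Set.add s (f i k ^ 2 + f j l ^ 2)) s) s) s ↔
        y ∈ s ∨ ∃ j ∈ r, ∃ k ∈ r, ∃ l ∈ r, y = f i k ^ 2 + f j l ^ 2 := fun i =>
      pv_mem_foldl _ _ (fun s b y => h2 i b s y) r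
    have hA : ∀ (y : Int),
        y ∈ r.foldl (fun s i => r.foldl (fun s j => r.foldl (fun s k =>
            r.foldl (fun s l => PySem.Set.add s (f i k ^ 2 + f j l ^ 2)) s) s) s)
            PySem.Set.empty ↔
        ∃ i ∈ r, ∃ j ∈ r, ∃ k ∈ r, ∃ l ∈ r, y = f i k ^ 2 + f j l ^ 2 := by
      intro y
      rw [pv_mem_foldl _ _ (fun s b y => h3 b s y)]
      simp [PySem.Set.empty]
    -- membership in B's set
    have hB : ∀ (y : Int),
        y ∈ r2.foldl (fun s a =>
            r2.foldl (fun s b => PySem.Set.add s (a * a + b * b)) s)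
            PySem.Set.empty ↔
        ∃ a ∈ r2, ∃ b ∈ r2, y = a * a + b * b := by
      intro y
      rw [pv_mem_foldl _ (fun a y => ∃ b ∈ r2, y = a * a + b * b)
        (fun s a y => pv_mem_foldl (fun s b => PySem.Set.add s (a * a + b * b))
          (fun b y => y = a * a + b * b)
          (fun s b y => PySem.Set.mem_add s _ y) r2 s y)]
      simp [PySem.Set.empty]
    -- same members
    have hmem : ∀ y,
        (∃ i ∈ r, ∃ j ∈ r, ∃ k ∈ r, ∃ l ∈ r, y = f i k ^ 2 + f j l ^ 2) ↔
        (∃ a ∈ r2, ∃ b ∈ r2, y = a * a + b * b) := by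
      intro y
      simp only [hrdef, hr2def, PySem.List.mem_pyRange_one]
      constructor
      · rintro ⟨i, hi, j, hj, k, hk, l, hl, rfl⟩
        refine ⟨f i k, ?_, f j l, ?_, by ring⟩
        · have := (pv_axis_range n hn (f i k)).1 ⟨i, hi, k, hk, rfl⟩
          omega
        · have := (pv_axis_range n hn (f j l)).1 ⟨j, hj, l, hl, rfl⟩
          omega
      · rintro ⟨a, ha, b, hb, rfl⟩
        obtain ⟨i, hi, k, hk, hik⟩ := (pv_axis_range n hn a).2 (by omega)
        obtain ⟨j, hj, l, hl, hjl⟩ := (pv_axis_range n hn b).2 (by omega)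
        exact ⟨i, hi, j, hj, k, hk, l, hl, by simp only [hf]; rw [← hik, ← hjl]; ring⟩
    -- both results are Nodup lists
    have hndA : (r.foldl (fun s i => r.foldl (fun s j => r.foldl (fun s k =>
        r.foldl (fun s l => PySem.Set.add s (f i k ^ 2 + f j l ^ 2)) s) s) s)
        PySem.Set.empty).Nodup := by
      refine pv_nodup_foldl _ (fun s i hs => ?_) r PySem.Set.empty List.nodup_nil
      refine pv_nodup_foldl _ (fun s j hs => ?_) r s hs
      refine pv_nodup_foldl _ (fun s k hs => ?_) r s hs
      exact pv_nodup_foldl _ (fun s l hs => PySem.Set.nodup_add s _ hs) r s hs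
    have hndB : (r2.foldl (fun s a =>
        r2.foldl (fun s b => PySem.Set.add s (a * a + b * b)) s)
        PySem.Set.empty).Nodup := by
      refine pv_nodup_foldl _ (fun s a hs => ?_) r2 PySem.Set.empty List.nodup_nil
      exact pv_nodup_foldl _ (fun s b hs => PySem.Set.nodup_add s _ hs) r2 s hs
    have hperm := (List.perm_ext_iff_of_nodup hndA hndB).2
      (fun y => by rw [hA y, hB y]; exact hmem y)
    have hlen := hperm.length_eq
    simp only [hf] at hlen
    simp only [PySem.Set.len, hlen]
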